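-- pv_equiv track=rewrite | github.com/salsina/datastructure-CA1 | ca1.1.py | check_inversions
-- ===== SOURCE A (Python) =====
-- def check_inversions(list_of_heights):
--     num_of_inversions = 0
--     min = list_of_heights[-1]
--     for i in range(len(list_of_heights)):
--         if list_of_heights[-i-1] <= min:
--             min = list_of_heights[-i -1]
--         else:
--             num_of_inversions +=1
--     return num_of_inversions
-- ===== SOURCE B (Python) =====
-- def check_inversions(list_of_heights):
--     # build the suffix-minimum table right-to-left, then count in one forward pass
--     rev_min = []
--     for x in reversed(list_of_heights):
--         rev_min.append(x if not rev_min else min(x, rev_min[-1]))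
--     suffix_min = rev_min[::-1]
--     return sum(1 for h, m in zip(list_of_heights, suffix_min[1:]) if h > m)
-- ===== Notes on version B (the rewrite author's own statement) =====
-- stated objective: alternative
-- what changed: A interleaves a running minimum with counting in one right-to-left loop; B first precomputes the suffix-minimum table and then counts, in a separate forward pass over zip(heights, suffix_min[1:]), the elements strictly greater than the minimum of their suffix. Pre_ excludes the empty list, on which A raises IndexError.
import Mathlib
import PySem

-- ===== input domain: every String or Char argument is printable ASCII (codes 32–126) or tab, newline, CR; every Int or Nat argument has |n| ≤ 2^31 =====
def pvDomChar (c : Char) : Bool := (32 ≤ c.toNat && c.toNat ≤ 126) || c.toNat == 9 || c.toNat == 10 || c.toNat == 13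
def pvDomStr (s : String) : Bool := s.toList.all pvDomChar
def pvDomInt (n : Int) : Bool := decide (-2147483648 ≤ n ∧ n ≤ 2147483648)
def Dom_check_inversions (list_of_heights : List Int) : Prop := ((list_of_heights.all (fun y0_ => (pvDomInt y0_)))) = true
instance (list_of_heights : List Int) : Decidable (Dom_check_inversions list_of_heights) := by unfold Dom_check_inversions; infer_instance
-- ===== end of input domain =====

-- B precomputes the suffix-minimum table and counts in a separate forward pass; A interleaves a
-- running minimum with the count in one right-to-left loop. Return-value equivalence on nonempty lists.

-- ===== PORT A =====
-- literal port of A: min = xs[-1] (IndexError on [] → outside Pre_), then one loop over range(len(xs))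
def check_inversions (list_of_heights : List Int) : Int :=
  match PySem.List.pyGet? list_of_heights (-1) with
  | none => 0  -- Python raises IndexError here; excluded by Pre_
  | some m0 =>
    ((PySem.List.pyRange 0 (list_of_heights.length : Int) 1).foldl
      (fun (st : Int × Int) i =>
        if PySem.List.pyGetD list_of_heights (-i - 1) 0 ≤ st.2 then
          (st.1, PySem.List.pyGetD list_of_heights (-i - 1) 0)
        else (st.1 + 1, st.2))
      (0, m0)).1

-- ===== PORT B =====
-- the suffix-minimum table of Source B, built right-to-left
def suffixMins : List Int → List Int
  | [] => []
  | x :: xs =>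
    let rest := suffixMins xs
    (match rest with | [] => x | m :: _ => min x m) :: rest

def check_inversions_alt (list_of_heights : List Int) : Int :=
  let sm := suffixMins list_of_heights
  ((list_of_heights.zip (sm.drop 1)).countP (fun p => decide (p.2 < p.1)) : Int)

-- ===== PRECONDITION & SPEC =====
-- Pre_ excludes only the empty list, on which Python A raises IndexError at list_of_heights[-1].
def Pre_check_inversions (list_of_heights : List Int) : Prop := list_of_heights ≠ []
instance (list_of_heights : List Int) : Decidable (Pre_check_inversions list_of_heights) := by
  unfold Pre_check_inversions; infer_instance

def pvWitness_check_inversions : List Int := [3, 1, 2]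

def Spec_check_inversions (list_of_heights : List Int) (out : Int) : Prop := out = check_inversions_alt list_of_heights
instance (list_of_heights : List Int) (out : Int) : Decidable (Spec_check_inversions list_of_heights out) := by unfold Spec_check_inversions; infer_instance

-- ===== CLAIM (what is proved, stated in full; the proofs are below) =====
def Claim_equal_check_inversions : Prop := ∀ (list_of_heights : List Int), Dom_check_inversions list_of_heights → Pre_check_inversions list_of_heights → Spec_check_inversions list_of_heights (check_inversions list_of_heights)

-- ===== LEMMAS AND PROOFS =====

-- A's loop body, seen as a foldr step over the list read right-to-left
def aStep (st : Int × Int) (v : Int) : Int × Int :=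
  if v ≤ st.2 then (st.1, v) else (st.1 + 1, st.2)

-- index -i-1 into xs is index i into xs.reverse
theorem pyGetD_neg_rev (xs : List Int) (i : Int) (h0 : 0 ≤ i) (h : i < (xs.length : Int)) :
    PySem.List.pyGetD xs (-i - 1) 0 = PySem.List.pyGetD xs.reverse i 0 := by
  obtain ⟨k, rfl⟩ := Int.eq_ofNat_of_zero_le h0
  have hk : k < xs.length := by exact_mod_cast h
  have h1 : (-(k : Int) - 1) = -((k + 1 : Nat) : Int) := by push_cast; ring
  rw [h1, PySem.List.pyGetD_neg_natCast _ _ _ (by omega) (by omega),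
      PySem.List.pyGetD_natCast]
  rw [List.getD_eq_getElem _ _ (by simpa using hk), List.getElem_reverse]
  congr 1
  omega

theorem check_inversions_eq_foldr (xs : List Int) (m0 : Int)
    (h : PySem.List.pyGet? xs (-1) = some m0) :
    check_inversions xs = (xs.foldr (fun v st => aStep st v) (0, m0)).1 := by
  unfold check_inversions
  rw [h]
  dsimp only
  have hcongr : (PySem.List.pyRange 0 (xs.length : Int) 1).foldl
      (fun (st : Int × Int) i =>
        if PySem.List.pyGetD xs (-i - 1) 0 ≤ st.2 then
          (st.1, PySem.List.pyGetD xs (-i - 1) 0)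
        else (st.1 + 1, st.2)) (0, m0)
      = (PySem.List.pyRange 0 (xs.length : Int) 1).foldl
      (fun (st : Int × Int) i => aStep st (PySem.List.pyGetD xs.reverse i 0)) (0, m0) := by
    apply PySem.List.foldl_congr_mem
    intro acc i hi
    rw [PySem.List.mem_pyRange_one] at hi
    simp only [aStep]
    rw [pyGetD_neg_rev xs i hi.1 hi.2]
  rw [hcongr]
  have hlen : (xs.length : Int) = (xs.reverse.length : Int) := by simp
  rw [hlen, PySem.List.foldl_pyRange_zero_pyGetD' xs.reverse 0 aStep (0, m0),
      List.foldl_reverse]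

-- head of the suffix-minimum table, i.e. the minimum of a nonempty list
def smHead : List Int → Int → Int
  | xs, d => match suffixMins xs with | [] => d | m :: _ => m

-- B's count as a function
def cntB (xs : List Int) : Int :=
  ((xs.zip ((suffixMins xs).drop 1)).countP (fun p => decide (p.2 < p.1)) : Int)

theorem cntB_eq_alt (xs : List Int) : check_inversions_alt xs = cntB xs := rfl

-- the main invariant: A's right-to-left fold computes (B's count, the suffix minimum)
theorem foldr_aStep_eq (xs : List Int) (hne : xs ≠ []) :
    xs.foldr (fun v st => aStep st v) (0, xs.getLast hne)
      = (cntB xs, smHead xs 0) := by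
  induction xs with
  | nil => exact absurd rfl hne
  | cons a t ih =>
    cases t with
    | nil =>
      simp [aStep, cntB, smHead, suffixMins]
    | cons b t' =>
      have hne' : b :: t' ≠ [] := by simp
      have hlast : (a :: b :: t').getLast hne = (b :: t').getLast hne' := by
        simp [List.getLast_cons]
      rw [List.foldr_cons, hlast, ih hne']
      -- suffixMins (b :: t') is a cons; name its head
      have hsm : suffixMins (b :: t') =
          smHead (b :: t') 0 :: suffixMins t' := by
        simp [suffixMins, smHead]
      have hcnt : cntB (a :: b :: t')
          = (if smHead (b :: t') 0 < a then 1 else 0) + cntB (b :: t') := by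
        unfold cntB
        rw [show suffixMins (a :: b :: t')
              = (match suffixMins (b :: t') with | [] => a | m :: _ => min a m)
                :: suffixMins (b :: t') from rfl]
        rw [List.drop_one, List.tail_cons, hsm, List.zip_cons_cons, List.countP_cons]
        by_cases hlt : smHead (b :: t') 0 < a <;> simp [hlt] <;> push_cast <;> ring
      have hhead : smHead (a :: b :: t') 0 = min a (smHead (b :: t') 0) := by
        simp [smHead, suffixMins]
      rw [hcnt, hhead]
      unfold aStep
      by_cases hle : a ≤ smHead (b :: t') 0
      · have : ¬ smHead (b :: t') 0 < a := not_lt.mpr hle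
        simp [this, min_eq_left hle]
      · have hlt : smHead (b :: t') 0 < a := lt_of_not_ge hle
        simp [hle, hlt, min_eq_right (le_of_lt hlt)]
        omega

-- ===== VERDICT (by name: the statement is the Claim_ definition above) =====
theorem check_inversions_spec : Claim_equal_check_inversions := by
  intro xs _ hpre
  unfold Spec_check_inversions
  have hne : xs ≠ [] := hpre
  have hget : PySem.List.pyGet? xs (-1) = some (xs.getLast hne) := by
    rw [PySem.List.pyGet?_neg_one, List.getLast?_eq_some_getLast]
  rw [check_inversions_eq_foldr xs _ hget, foldr_aStep_eq xs hne, cntB_eq_alt]
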